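-- pv_equiv track=rewrite | github.com/DaniyalAhmed-kh/Cloud-Red-Team-Framework | tools/scanners/k8s-rbac-analyzer.py | check_dangerous_permissions
-- ===== SOURCE A (Python) =====
-- from typing import List, Dict, Any
--
-- def check_dangerous_permissions(rules: List[Dict]) -> bool:
--     """Check if rules contain dangerous permissions."""
--     dangerous_verbs = ['*', 'create', 'delete', 'patch', 'update']
--     dangerous_resources = ['clusterroles', 'clusterrolebindings', 'roles', 'rolebindings', 'secrets', '*']
--
--     for rule in rules:
--         verbs = rule.get('verbs', [])
--         resources = rule.get('resources', [])
--
--         # Wildcard permissions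
--         if '*' in verbs or '*' in resources:
--             return True
--
--         # Check for dangerous combinations
--         for verb in verbs:
--             if verb in dangerous_verbs:
--                 for resource in resources:
--                     if resource in dangerous_resources:
--                         return True
--
--     return False
-- ===== SOURCE B (Python) =====
-- from typing import List, Dict, Any
--
-- _DANGEROUS_VERBS = ['*', 'create', 'delete', 'patch', 'update']
-- _DANGEROUS_RESOURCES = ['clusterroles', 'clusterrolebindings', 'roles',
--                         'rolebindings', 'secrets', '*']
--
-- def _flags(names, dangerous):
--     """Single pass: (contains a wildcard, contains any dangerous name)."""
--     wild = dang = False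
--     for n in names:
--         wild = wild or n == '*'
--         dang = dang or n in dangerous
--     return wild, dang
--
-- def check_dangerous_permissions(rules: List[Dict]) -> bool:
--     """Check if rules contain dangerous permissions."""
--     if not rules:
--         return False
--     rule = rules[0]
--     wv, dv = _flags(rule.get('verbs', []), _DANGEROUS_VERBS)
--     wr, dr = _flags(rule.get('resources', []), _DANGEROUS_RESOURCES)
--     return wv or wr or (dv and dr) or check_dangerous_permissions(rules[1:])
-- ===== Notes on version B (the rewrite author's own statement) =====
-- stated objective: alternative
-- what changed: recursion over the rule list instead of a loop, and per rule one accumulator pass over each name list computing (has-wildcard, has-dangerous) flag pairs that are then combined by the boolean formula wv or wr or (dv and dr), replacing A's nested verb-by-resource scan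
import Mathlib
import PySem

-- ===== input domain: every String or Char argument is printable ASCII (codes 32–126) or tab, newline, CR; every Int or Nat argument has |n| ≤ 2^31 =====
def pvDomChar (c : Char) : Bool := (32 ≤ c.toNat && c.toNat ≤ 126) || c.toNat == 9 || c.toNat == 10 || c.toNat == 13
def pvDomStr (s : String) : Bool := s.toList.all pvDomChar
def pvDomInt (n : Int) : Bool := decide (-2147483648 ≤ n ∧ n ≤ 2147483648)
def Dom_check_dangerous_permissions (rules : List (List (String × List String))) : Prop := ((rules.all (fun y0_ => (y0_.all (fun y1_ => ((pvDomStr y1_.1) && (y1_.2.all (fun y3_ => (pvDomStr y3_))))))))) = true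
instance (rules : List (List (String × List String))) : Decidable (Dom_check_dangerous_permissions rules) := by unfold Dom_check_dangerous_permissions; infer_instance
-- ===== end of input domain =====

-- B recurses over the rule list and replaces A's nested verb×resource scan by one
-- accumulator pass per name list computing (wildcard, dangerous) flags (alternative decomposition).

-- ===== PORT A =====
def check_dangerous_permissions (rules : List (List (String × List String))) : Bool :=
  let dangerous_verbs : List String := ["*", "create", "delete", "patch", "update"]
  let dangerous_resources : List String := ["clusterroles", "clusterrolebindings", "roles", "rolebindings", "secrets", "*"]
  rules.any (fun rule =>
    let verbs := PySem.Dict.getD ⟨rule⟩ "verbs" []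
    let resources := PySem.Dict.getD ⟨rule⟩ "resources" []
    if verbs.contains "*" || resources.contains "*" then true
    else
      -- for verb in verbs: if verb in dangerous_verbs: for resource in resources: if resource in dangerous_resources: return True
      verbs.any (fun verb =>
        dangerous_verbs.contains verb &&
          resources.any (fun resource => dangerous_resources.contains resource)))

-- ===== PORT B =====
def pvDangerousVerbs : List String := ["*", "create", "delete", "patch", "update"]
def pvDangerousResources : List String := ["clusterroles", "clusterrolebindings", "roles", "rolebindings", "secrets", "*"]

-- single pass over names with a (wild, dang) accumulator, as in Source B's _flags
def pvFlags (names : List String) (dangerous : List String) : Bool × Bool :=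
  names.foldl (fun acc n => (acc.1 || n == "*", acc.2 || dangerous.contains n)) (false, false)

def check_dangerous_permissions_alt : List (List (String × List String)) → Bool
  | [] => false
  | rule :: rest =>
    let vf := pvFlags (PySem.Dict.getD ⟨rule⟩ "verbs" []) pvDangerousVerbs
    let rf := pvFlags (PySem.Dict.getD ⟨rule⟩ "resources" []) pvDangerousResources
    vf.1 || rf.1 || (vf.2 && rf.2) || check_dangerous_permissions_alt rest

-- ===== PRECONDITION & SPEC =====
def Spec_check_dangerous_permissions (rules : List (List (String × List String))) (out : Bool) : Prop := out = check_dangerous_permissions_alt rules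
instance (rules : List (List (String × List String))) (out : Bool) : Decidable (Spec_check_dangerous_permissions rules out) := by unfold Spec_check_dangerous_permissions; infer_instance

-- ===== CLAIM (what is proved, stated in full; the proofs are below) =====
def Claim_equal_check_dangerous_permissions : Prop := ∀ (rules : List (List (String × List String))), Dom_check_dangerous_permissions rules → Spec_check_dangerous_permissions rules (check_dangerous_permissions rules)

-- ===== LEMMAS AND PROOFS =====

-- the accumulator pass computes exactly (contains '*', any dangerous member)
theorem pvFlags_eq (names dangerous : List String) :
    pvFlags names dangerous = (names.contains "*", names.any (fun n => dangerous.contains n)) := by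
  unfold pvFlags
  suffices h : ∀ acc : Bool × Bool,
      names.foldl (fun acc n => (acc.1 || n == "*", acc.2 || dangerous.contains n)) acc
        = (acc.1 || names.contains "*", acc.2 || names.any (fun n => dangerous.contains n)) by
    simpa using h (false, false)
  induction names with
  | nil => intro acc; simp
  | cons x xs ih =>
    intro acc
    simp only [List.foldl_cons, ih, List.contains_cons, List.any_cons]
    simp [Bool.or_assoc, BEq.comm]

-- an inner any with a body independent of the loop variable factors out
theorem pv_any_and_const (xs : List String) (p : String → Bool) (b : Bool) :
    xs.any (fun x => p x && b) = (xs.any p && b) := by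
  cases b <;> simp

-- per-rule agreement of the two programs' rule tests
theorem pv_rule_eq (rule : List (String × List String)) (rest : Bool) :
    (let verbs := PySem.Dict.getD (⟨rule⟩ : PySem.Dict String (List String)) "verbs" []
     let resources := PySem.Dict.getD (⟨rule⟩ : PySem.Dict String (List String)) "resources" []
     ((if verbs.contains "*" || resources.contains "*" then true
       else verbs.any (fun verb => pvDangerousVerbs.contains verb &&
              resources.any (fun resource => pvDangerousResources.contains resource))) || rest))
    = (let vf := pvFlags (PySem.Dict.getD (⟨rule⟩ : PySem.Dict String (List String)) "verbs" []) pvDangerousVerbs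
       let rf := pvFlags (PySem.Dict.getD (⟨rule⟩ : PySem.Dict String (List String)) "resources" []) pvDangerousResources
       (vf.1 || rf.1 || (vf.2 && rf.2) || rest)) := by
  simp only [pvFlags_eq, pv_any_and_const]
  set verbs := PySem.Dict.getD (⟨rule⟩ : PySem.Dict String (List String)) "verbs" []
  set resources := PySem.Dict.getD (⟨rule⟩ : PySem.Dict String (List String)) "resources" []
  cases hwv : verbs.contains "*" with
  | true => simp
  | false =>
    cases hwr : resources.contains "*" with
    | true => simp
    | false =>
      simp only [Bool.or_self, Bool.false_or]
      rfl

-- every port equals its counterpart (the claim's content, proved without Dom)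
theorem pv_main (rules : List (List (String × List String))) :
    check_dangerous_permissions rules = check_dangerous_permissions_alt rules := by
  induction rules with
  | nil => rfl
  | cons rule rest ih =>
    unfold check_dangerous_permissions at ih ⊢
    unfold check_dangerous_permissions_alt
    simp only [List.any_cons]
    rw [ih]
    exact pv_rule_eq rule (check_dangerous_permissions_alt rest)

-- ===== VERDICT (by name: the statement is the Claim_ definition above) =====
theorem check_dangerous_permissions_spec : Claim_equal_check_dangerous_permissions := by
  intro rules _
  exact pv_main rules
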